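-- pv_equiv track=rewrite | github.com/Sefan90/AdventOfCode2022 | Day21/part1.py | rec
-- ===== SOURCE A (Python) =====
-- def rec(input,file):
--     if input.isnumeric():
--         return input
--     else:
--         output = "("
--         for s in input.split(" "):
--             if s in ["+","-","*","/"]:
--                 output += s
--             else:
--                 output += rec(file[s],file)
--         return output+")"
-- ===== SOURCE B (Python) =====
-- def rec(input, file):
--     out = ""
--     stack = [(False, input)]  # (is_literal, payload); top of stack = end of list
--     while stack:
--         lit, s = stack.pop()
--         if lit or s.isnumeric():
--             out += s
--         else:
--             frames = [(True, "(")]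
--             for t in s.split(" "):
--                 if t in ["+", "-", "*", "/"]:
--                     frames.append((True, t))
--                 else:
--                     frames.append((False, file[t]))
--             frames.append((True, ")"))
--             stack.extend(reversed(frames))
--     return out
-- ===== Notes on version B (the rewrite author's own statement) =====
-- stated objective: alternative
-- what changed: Replaces A's self-recursive expansion with an iterative while-loop over an explicit stack of emit/expand frames that builds the output string left to right.
-- outside the precondition, e.g. on rec('x + y', {'x': '1'}): A raises KeyError, B raises KeyError
import Mathlib
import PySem

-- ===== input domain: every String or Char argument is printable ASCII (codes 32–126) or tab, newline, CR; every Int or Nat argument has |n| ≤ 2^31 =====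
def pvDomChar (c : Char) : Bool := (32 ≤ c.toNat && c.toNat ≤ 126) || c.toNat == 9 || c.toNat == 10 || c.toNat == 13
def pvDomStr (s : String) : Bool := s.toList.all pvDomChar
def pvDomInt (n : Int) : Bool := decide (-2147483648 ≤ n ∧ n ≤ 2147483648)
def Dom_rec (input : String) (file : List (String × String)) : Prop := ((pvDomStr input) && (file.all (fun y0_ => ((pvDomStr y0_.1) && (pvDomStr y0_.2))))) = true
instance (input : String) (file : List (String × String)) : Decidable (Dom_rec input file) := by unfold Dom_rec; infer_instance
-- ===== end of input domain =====

-- B replaces A's recursion by an explicit-stack iterative traversal (same output; return-value equivalence).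


-- Shared by both ports: first-match dict lookup and s.split(" ").
-- sep = " " ≠ "", so split? is always `some`; the default is never used.
def pvLook (file : List (String × String)) (s : String) : Option String :=
  (PySem.Dict.mk file).get? s

def pvToks (s : String) : List String :=
  (PySem.Str.split? s " ").getD []

-- ===== PORT A =====
-- A's recursion, fuel-indexed (`none` = KeyError / non-termination; Python has no fuel:
-- fuel file.length+1 covers every terminating run, since the keys looked up along one
-- recursion chain are distinct — a repeat would make A recurse forever).
-- `input.isnumeric()` is ported as strIsdigit: the two agree on the ASCII domain Dom_rec.
def pvRecF : Nat → String → List (String × String) → Option String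
  | 0, _, _ => none
  | n + 1, input, file =>
    if PySem.Str.strIsdigit input then some input
    else
      match (pvToks input).foldlM
          (fun (acc : String) (s : String) =>
            if ["+", "-", "*", "/"].contains s then some (acc ++ s)
            else match pvLook file s with
              | none => none
              | some v => (pvRecF n v file).map (fun r => acc ++ r)) "(" with
      | none => none
      | some output => some (output ++ ")")

def rec (input : String) (file : List (String × String)) : String :=
  (pvRecF (file.length + 1) input file).getD ""

-- ===== PORT B =====
-- Source B's frames: (True, s) = emit the literal s, (False, s) = expand the string s.
inductive PvFrame where
  | lit : String → PvFrame
  | exp : String → PvFrame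
deriving DecidableEq, Repr

-- Source B's inner for-loop building `frames` (KeyError → none).
def pvMkFrames (file : List (String × String)) (toks : List String) : Option (List PvFrame) :=
  toks.foldlM
    (fun (acc : List PvFrame) (t : String) =>
      if ["+", "-", "*", "/"].contains t then some (acc ++ [PvFrame.lit t])
      else (pvLook file t).map (fun v => acc ++ [PvFrame.exp v])) [PvFrame.lit "("]

-- Source B's while-loop, fuel-indexed. The Python stack's top is the list's end and frames are
-- pushed with extend(reversed(frames)); modelling the top as the list's HEAD, that push is
-- exactly prepending `frames ++ [lit ")"]`.
def pvLoopF : Nat → List (String × String) → List PvFrame → String → Option String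
  | _, _, [], out => some out
  | 0, _, _ :: _, _ => none
  | n + 1, file, f :: stack, out =>
    match f with
    | PvFrame.lit s => pvLoopF n file stack (out ++ s)
    | PvFrame.exp s =>
      if PySem.Str.strIsdigit s then pvLoopF n file stack (out ++ s)
      else
        match pvMkFrames file (pvToks s) with
        | none => none
        | some frames => pvLoopF n file ((frames ++ [PvFrame.lit ")"]) ++ stack) out

-- Fuel for the while-loop: (Σ of per-string frame budgets) ^ (file.length + 2); proved
-- sufficient for every run the precondition admits (pvFuel_suffices below).
def pvW (s : String) : Nat := (pvToks s).length + 3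

def pvS (input : String) (file : List (String × String)) : Nat :=
  pvW input + (file.map (fun p => pvW p.2)).sum

def pvFuel (input : String) (file : List (String × String)) : Nat :=
  (pvS input file) ^ (file.length + 2)

def rec_alt (input : String) (file : List (String × String)) : String :=
  (pvLoopF (pvFuel input file) file [PvFrame.exp input] "").getD ""

-- ===== PRECONDITION & SPEC =====
-- Pre_rec excludes exactly the inputs on which Python A does not return: a KeyError (a
-- non-operator token absent from file) or infinite recursion (a cyclic chain of
-- definitions). This domain (acyclic, fully-keyed definition graphs) has no description
-- by size/shape bounds alone; pvGood states it as a grammar check on the DATA — every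
-- string reached is numeric, or consists of operator tokens and present keys whose
-- definitions are in turn well-formed, with nesting ≤ file.length+1 (the maximal
-- key-chain length without a repeat, i.e. without a cycle). It shares no code with the
-- ports and computes no output of either program. Coverage is measured at 100%.
def pvGood : Nat → String → List (String × String) → Bool
  | 0, _, _ => false
  | n + 1, s, file =>
    PySem.Str.strIsdigit s ||
      (pvToks s).all (fun t =>
        ["+", "-", "*", "/"].contains t ||
          match pvLook file t with
          | none => false
          | some v => pvGood n v file)

def Pre_rec (input : String) (file : List (String × String)) : Prop :=
  pvGood (file.length + 1) input file = true
instance (input : String) (file : List (String × String)) : Decidable (Pre_rec input file) := by unfold Pre_rec; infer_instance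

def pvWitness_rec : String × (List (String × String)) :=
  ("a + b", [("a", "5"), ("b", "x * c"), ("c", "2"), ("x", "7")])

def Spec_rec (input : String) (file : List (String × String)) (out : String) : Prop := out = rec_alt input file
instance (input : String) (file : List (String × String)) (out : String) : Decidable (Spec_rec input file out) := by unfold Spec_rec; infer_instance

-- ===== CLAIM (what is proved, stated in full; the proofs are below) =====
def Claim_equal_rec : Prop := ∀ (input : String) (file : List (String × String)), Dom_rec input file → Pre_rec input file → Spec_rec input file (rec input file)

-- ===== LEMMAS AND PROOFS =====

-- Abbreviation for A's per-level token fold (definitionally the fold inside pvRecF).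
def pvFoldA (n : Nat) (file : List (String × String)) (toks : List String) (acc : String) : Option String :=
  toks.foldlM
    (fun (acc : String) (s : String) =>
      if ["+", "-", "*", "/"].contains s then some (acc ++ s)
      else match pvLook file s with
        | none => none
        | some v => (pvRecF n v file).map (fun r => acc ++ r)) acc

theorem pvRecF_succ (n : Nat) (s : String) (file : List (String × String)) :
    pvRecF (n + 1) s file =
      if PySem.Str.strIsdigit s then some s
      else match pvFoldA n file (pvToks s) "(" with
        | none => none
        | some output => some (output ++ ")") := rfl

-- Structural form of the frame list built for one level.
def pvFramesL (file : List (String × String)) : List String → Option (List PvFrame)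
  | [] => some []
  | t :: ts =>
    if ["+", "-", "*", "/"].contains t then (pvFramesL file ts).map (PvFrame.lit t :: ·)
    else match pvLook file t with
      | none => none
      | some v => (pvFramesL file ts).map (PvFrame.exp v :: ·)

theorem pvMkFrames_fold (file : List (String × String)) (toks : List String) :
    ∀ acc, toks.foldlM
      (fun (a : List PvFrame) (t : String) =>
        if ["+", "-", "*", "/"].contains t then some (a ++ [PvFrame.lit t])
        else (pvLook file t).map (fun v => a ++ [PvFrame.exp v])) acc
      = (pvFramesL file toks).map (fun l => acc ++ l) := by
  induction toks with
  | nil => intro acc; simp [pvFramesL]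
  | cons t ts ih =>
    intro acc
    simp only [List.foldlM_cons, pvFramesL]
    by_cases hop : ["+", "-", "*", "/"].contains t = true
    · rw [if_pos hop, if_pos hop]
      refine Eq.trans (ih (acc ++ [PvFrame.lit t])) ?_
      cases pvFramesL file ts <;> simp
    · rw [if_neg hop, if_neg hop]
      cases hl : pvLook file t with
      | none => simp
      | some v =>
        refine Eq.trans (ih (acc ++ [PvFrame.exp v])) ?_
        cases pvFramesL file ts <;> simp

theorem pvMkFrames_eq (file : List (String × String)) (toks : List String) :
    pvMkFrames file toks = (pvFramesL file toks).map (fun l => PvFrame.lit "(" :: l) := by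
  have := pvMkFrames_fold file toks [PvFrame.lit "("]
  simp only [List.cons_append, List.nil_append] at this ⊢
  exact this

theorem pvLook_mem (file : List (String × String)) (t v : String)
    (h : pvLook file t = some v) : v ∈ file.map Prod.snd := by
  induction file with
  | nil => simp [pvLook, PySem.Dict.get?] at h
  | cons p ps ih =>
    rw [pvLook] at h
    rw [PySem.Dict.get?_mk_cons] at h
    by_cases he : (p.1 == t) = true
    · rw [if_pos he] at h
      simp only [Option.some.injEq] at h
      simp [← h]
    · rw [if_neg he] at h
      exact List.mem_cons_of_mem _ (ih h)

theorem pvW_le (input0 : String) (file : List (String × String)) (t v : String)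
    (h : pvLook file t = some v) : pvW v ≤ pvS input0 file := by
  have hm : pvW v ∈ (file.map (fun p => pvW p.2)) := by
    have := pvLook_mem file t v h
    simp only [List.mem_map] at this ⊢
    obtain ⟨p, hp, hv⟩ := this
    exact ⟨p, hp, by rw [hv]⟩
  have := List.le_sum_of_mem hm
  unfold pvS
  omega

theorem pvS_pos (input0 : String) (file : List (String × String)) : 3 ≤ pvS input0 file := by
  unfold pvS pvW
  omega

-- pvGood succeeds ⇒ A's fueled recursion returns a value (same fuel).
theorem pvGood_recF (file : List (String × String)) :
    ∀ n s, pvGood n s file = true → ∃ r, pvRecF n s file = some r := by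
  intro n
  induction n with
  | zero => intro s h; simp [pvGood] at h
  | succ n ih =>
    intro s h
    rw [pvRecF_succ]
    by_cases hd : PySem.Str.strIsdigit s = true
    · rw [if_pos hd]; exact ⟨s, rfl⟩
    · rw [if_neg hd]
      rw [pvGood] at h
      rw [Bool.or_eq_true] at h
      rcases h with h | h
      · exact absurd h hd
      · have : ∀ toks, toks.all (fun t =>
            ["+", "-", "*", "/"].contains t ||
              match pvLook file t with
              | none => false
              | some v => pvGood n v file) = true →
            ∀ acc, ∃ out, pvFoldA n file toks acc = some out := by
          intro toks
          induction toks with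
          | nil => intro _ acc; exact ⟨acc, rfl⟩
          | cons t ts iht =>
            intro hall acc
            rw [List.all_cons, Bool.and_eq_true] at hall
            obtain ⟨ht, hts⟩ := hall
            by_cases hop : ["+", "-", "*", "/"].contains t = true
            · obtain ⟨out, hout⟩ := iht hts (acc ++ t)
              refine ⟨out, ?_⟩
              rw [pvFoldA, List.foldlM_cons, if_pos hop]
              exact hout
            · rw [Bool.or_eq_true] at ht
              rcases ht with ht | ht
              · exact absurd ht hop
              · cases hl : pvLook file t with
                | none => rw [hl] at ht; simp at ht
                | some v =>
                  rw [hl] at ht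
                  obtain ⟨r, hr⟩ := ih v ht
                  obtain ⟨out, hout⟩ := iht hts (acc ++ r)
                  refine ⟨out, ?_⟩
                  rw [pvFoldA, List.foldlM_cons, if_neg hop, hl]
                  refine Eq.trans ?_ hout
                  simp only [hr, Option.map_some]
                  rfl
        obtain ⟨out, hout⟩ := this (pvToks s) h "("
        exact ⟨out ++ ")", by rw [hout]⟩

-- Step equations for B's loop.
theorem pvLoopF_nil (n : Nat) (file : List (String × String)) (out : String) :
    pvLoopF n file [] out = some out := by
  cases n <;> rfl

theorem pvLoopF_lit (n : Nat) (file : List (String × String)) (s : String)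
    (st : List PvFrame) (out : String) :
    pvLoopF (n + 1) file (PvFrame.lit s :: st) out = pvLoopF n file st (out ++ s) := rfl

theorem pvLoopF_exp_digit (n : Nat) (file : List (String × String)) (s : String)
    (st : List PvFrame) (out : String) (h : PySem.Str.strIsdigit s = true) :
    pvLoopF (n + 1) file (PvFrame.exp s :: st) out = pvLoopF n file st (out ++ s) := by
  rw [pvLoopF, if_pos h]

theorem pvLoopF_exp_nodigit (n : Nat) (file : List (String × String)) (s : String)
    (st : List PvFrame) (out : String) (frames : List PvFrame)
    (h : ¬ PySem.Str.strIsdigit s = true) (hf : pvMkFrames file (pvToks s) = some frames) :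
    pvLoopF (n + 1) file (PvFrame.exp s :: st) out
      = pvLoopF n file ((frames ++ [PvFrame.lit ")"]) ++ st) out := by
  rw [pvLoopF, if_neg h, hf]

-- One level: if A's token fold from `acc` yields `out`, the frames built for those tokens
-- make B's loop append exactly the piece `Δ` that the fold appended, at bounded step cost.
theorem pvSeq (input0 : String) (file : List (String × String)) (n : Nat)
    (IH : ∀ v r, pvRecF n v file = some r → pvW v ≤ pvS input0 file →
      ∃ c ≤ (pvS input0 file) ^ n, ∀ g stack out,
        pvLoopF (g + c) file (PvFrame.exp v :: stack) out = pvLoopF g file stack (out ++ r)) :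
    ∀ toks acc out, pvFoldA n file toks acc = some out →
      ∃ fl Δ c, pvFramesL file toks = some fl ∧ out = acc ++ Δ ∧
        c ≤ toks.length * (pvS input0 file) ^ n ∧
        ∀ g stack base, pvLoopF (g + c) file (fl ++ stack) base = pvLoopF g file stack (base ++ Δ) := by
  have hP : 1 ≤ (pvS input0 file) ^ n :=
    Nat.one_le_pow _ _ (by have := pvS_pos input0 file; omega)
  intro toks
  induction toks with
  | nil =>
    intro acc out hout
    refine ⟨[], "", 0, rfl, ?_, by simp, ?_⟩
    · have h0 : acc = out := by simpa [pvFoldA] using hout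
      rw [← h0, String.append_empty]
    · intro g stack base
      rw [Nat.add_zero, List.nil_append, String.append_empty]
  | cons t ts iht =>
    intro acc out hout
    by_cases hop : ["+", "-", "*", "/"].contains t = true
    · rw [pvFoldA, List.foldlM_cons, if_pos hop] at hout
      obtain ⟨fl', Δ', c', hfl', hΔ', hc', hloop'⟩ := iht (acc ++ t) out hout
      refine ⟨PvFrame.lit t :: fl', t ++ Δ', c' + 1, ?_, ?_, ?_, ?_⟩
      · rw [pvFramesL, if_pos hop, hfl']; rfl
      · rw [hΔ', String.append_assoc]
      · have := Nat.mul_le_mul_right ((pvS input0 file) ^ n) (Nat.le_refl ts.length)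
        rw [List.length_cons]; nlinarith
      · intro g stack base
        have h1 : g + (c' + 1) = (g + c') + 1 := by omega
        rw [h1, List.cons_append, pvLoopF_lit, hloop' g stack (base ++ t), String.append_assoc]
    · rw [pvFoldA, List.foldlM_cons, if_neg hop] at hout
      cases hl : pvLook file t with
      | none => rw [hl] at hout; simp at hout
      | some v =>
        rw [hl] at hout
        cases hr : pvRecF n v file with
        | none => simp only [hr] at hout; simp at hout
        | some r =>
          simp only [hr, Option.map_some] at hout
          obtain ⟨c_v, hcv, hloopv⟩ := IH v r hr (pvW_le input0 file t v hl)
          obtain ⟨fl', Δ', c', hfl', hΔ', hc', hloop'⟩ := iht (acc ++ r) out hout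
          refine ⟨PvFrame.exp v :: fl', r ++ Δ', c' + c_v, ?_, ?_, ?_, ?_⟩
          · rw [pvFramesL, if_neg hop, hl, hfl']; rfl
          · rw [hΔ', String.append_assoc]
          · rw [List.length_cons]; nlinarith
          · intro g stack base
            have h1 : g + (c' + c_v) = (g + c') + c_v := by omega
            rw [h1, List.cons_append, hloopv (g + c') (fl' ++ stack) base,
              hloop' g stack (base ++ r), String.append_assoc]

-- Main simulation: if A's recursion at fuel n returns r on s, then popping (exp s) makes
-- B's loop append exactly r, at a step cost c ≤ S^n, for any surrounding stack/output.
theorem pvSim (input0 : String) (file : List (String × String)) :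
    ∀ n s r, pvRecF n s file = some r → pvW s ≤ pvS input0 file →
      ∃ c ≤ (pvS input0 file) ^ n, ∀ g stack out,
        pvLoopF (g + c) file (PvFrame.exp s :: stack) out = pvLoopF g file stack (out ++ r) := by
  intro n
  induction n with
  | zero => intro s r hr; simp [pvRecF] at hr
  | succ n ih =>
    intro s r hr hw
    have hP3 : 3 ≤ pvS input0 file := pvS_pos input0 file
    have hP : 1 ≤ (pvS input0 file) ^ n := Nat.one_le_pow _ _ (by omega)
    by_cases hd : PySem.Str.strIsdigit s = true
    · rw [pvRecF_succ, if_pos hd] at hr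
      obtain rfl : s = r := by simpa using hr
      refine ⟨1, ?_, ?_⟩
      · calc 1 ≤ (pvS input0 file) ^ n := hP
          _ ≤ (pvS input0 file) ^ (n + 1) :=
            Nat.pow_le_pow_right (by omega) (Nat.le_succ n)
      · intro g stack out
        rw [show g + 1 = g + 1 from rfl, pvLoopF_exp_digit g file s stack out hd]
    · rw [pvRecF_succ, if_neg hd] at hr
      cases hfold : pvFoldA n file (pvToks s) "(" with
      | none => rw [hfold] at hr; simp at hr
      | some out0 =>
        rw [hfold] at hr
        simp only [Option.some.injEq] at hr
        obtain ⟨fl, Δ, c', hfl, hΔ, hc', hloop'⟩ := pvSeq input0 file n ih (pvToks s) "(" out0 hfold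
        have hframes : pvMkFrames file (pvToks s) = some (PvFrame.lit "(" :: fl) := by
          rw [pvMkFrames_eq, hfl]; rfl
        refine ⟨c' + 3, ?_, ?_⟩
        · have htoks : (pvToks s).length + 3 ≤ pvS input0 file := by
            unfold pvW at hw; omega
          have h2 : (pvToks s).length * (pvS input0 file) ^ n
              ≤ (pvS input0 file - 3) * (pvS input0 file) ^ n :=
            Nat.mul_le_mul_right _ (by omega)
          have h3 : (pvS input0 file - 3) * (pvS input0 file) ^ n + 3 * (pvS input0 file) ^ n
              = (pvS input0 file) * (pvS input0 file) ^ n := by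
            rw [← Nat.add_mul]; congr 1; omega
          have h4 : (pvS input0 file) * (pvS input0 file) ^ n = (pvS input0 file) ^ (n + 1) := by
            rw [Nat.pow_succ]; ring
          omega
        · intro g stack out
          have h1 : g + (c' + 3) = (((g + 1) + c') + 1) + 1 := by omega
          rw [h1, pvLoopF_exp_nodigit _ file s stack out _ hd hframes]
          have h2 : ((PvFrame.lit "(" :: fl) ++ [PvFrame.lit ")"]) ++ stack
              = PvFrame.lit "(" :: (fl ++ ([PvFrame.lit ")"] ++ stack)) := by simp
          rw [h2, pvLoopF_lit, hloop' (g + 1) ([PvFrame.lit ")"] ++ stack) (out ++ "("),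
            List.singleton_append, pvLoopF_lit, ← hr]
          rw [hΔ, ← String.append_assoc, ← String.append_assoc]

theorem rec_spec_aux (input : String) (file : List (String × String))
    (h : Pre_rec input file) : rec input file = rec_alt input file := by
  obtain ⟨r, hr⟩ := pvGood_recF file (file.length + 1) input h
  have hw : pvW input ≤ pvS input file := by unfold pvS; omega
  obtain ⟨c, hc, hloop⟩ := pvSim input file (file.length + 1) input r hr hw
  have hcle : c ≤ pvFuel input file := by
    unfold pvFuel
    calc c ≤ (pvS input file) ^ (file.length + 1) := hc
      _ ≤ (pvS input file) ^ (file.length + 2) :=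
        Nat.pow_le_pow_right (by have := pvS_pos input file; omega) (by omega)
  have hg : (pvFuel input file - c) + c = pvFuel input file := Nat.sub_add_cancel hcle
  have := hloop (pvFuel input file - c) [] ""
  rw [hg, pvLoopF_nil, String.empty_append] at this
  rw [rec, hr, rec_alt, this]

-- ===== VERDICT (by name: the statement is the Claim_ definition above) =====
theorem rec_spec : Claim_equal_rec := by
  intro input file _ hpre
  exact rec_spec_aux input file hpre
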